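-- pv_equiv track=rewrite | github.com/ran-uf/gramma | tomita4.py | label
-- ===== SOURCE A (Python) =====
-- def label(x):
--     num_0 = 0
--     for a in x:
--         if a == 0:
--             num_0 = num_0 + 1
--             if num_0 >= 3:
--                 return 0
--         elif a == 1:
--             num_0 = 0
--     return 1
-- ===== SOURCE B (Python) =====
-- def label(x):
--     # keep only the values that matter: 0 counts toward a run, 1 resets it
--     f = [a for a in x if a == 0 or a == 1]
--     for i in range(len(f) - 2):
--         if f[i:i+3] == [0, 0, 0]:
--             return 0
--     return 1
-- ===== Notes on version B (the rewrite author's own statement) =====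
-- stated objective: alternative
-- what changed: Replaces the stateful zero-counter scan with a filter (keep only 0s and 1s, since other values are neutral) followed by a sliding-window check for a three-zero window in the filtered list.
import Mathlib
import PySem

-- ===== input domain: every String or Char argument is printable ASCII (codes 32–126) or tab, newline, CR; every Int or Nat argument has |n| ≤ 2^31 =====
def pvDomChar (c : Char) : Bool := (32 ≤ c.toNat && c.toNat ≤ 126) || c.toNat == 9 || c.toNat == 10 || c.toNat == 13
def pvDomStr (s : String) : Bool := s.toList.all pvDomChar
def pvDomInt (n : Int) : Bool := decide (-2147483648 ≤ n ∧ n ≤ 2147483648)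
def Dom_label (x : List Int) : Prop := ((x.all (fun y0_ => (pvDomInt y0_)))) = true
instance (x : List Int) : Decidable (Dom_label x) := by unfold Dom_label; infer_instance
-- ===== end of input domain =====

-- B replaces A's stateful zero-counter scan by a filter (keep only 0/1) plus a sliding-window
-- search for a three-zero window; same return value, alternative decomposition.

-- ===== PORT A =====
-- A's for-loop with early return, counter num_0 carried as the recursion state
def labelGo (x : List Int) (num0 : Int) : Int :=
  match x with
  | [] => 1
  | a :: rest =>
    if a = 0 then
      if num0 + 1 ≥ 3 then 0 else labelGo rest (num0 + 1)
    else if a = 1 then labelGo rest 0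
    else labelGo rest num0

def label (x : List Int) : Int := labelGo x 0

-- ===== PORT B =====
def label_alt (x : List Int) : Int :=
  let f := x.filter (fun a => a == 0 || a == 1)
  if (PySem.List.pyRange 0 ((f.length : Int) - 2) 1).any
       (fun i => PySem.List.slice f (some i) (some (i + 3)) == [0, 0, 0]) then 0 else 1

-- ===== PRECONDITION & SPEC =====
def Spec_label (x : List Int) (out : Int) : Prop := out = label_alt x
instance (x : List Int) (out : Int) : Decidable (Spec_label x out) := by unfold Spec_label; infer_instance

-- ===== CLAIM (what is proved, stated in full; the proofs are below) =====
def Claim_equal_label : Prop := ∀ (x : List Int), Dom_label x → Spec_label x (label x)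

-- ===== LEMMAS AND PROOFS =====

-- "some window of three consecutive elements is [0,0,0]", as a structural recursion
def hasZZZ : List Int → Bool
  | [] => false
  | a :: t => (a == 0 && t.take 2 == [0, 0]) || hasZZZ t

lemma hasZZZ_iff (f : List Int) :
    hasZZZ f = true ↔ ∃ n : Nat, (f.drop n).take 3 = [0, 0, 0] := by
  induction f with
  | nil => simp [hasZZZ]
  | cons a t ih =>
    simp only [hasZZZ, Bool.or_eq_true, Bool.and_eq_true, beq_iff_eq, ih]
    constructor
    · rintro (⟨ha, ht⟩ | ⟨n, hn⟩)
      · exact ⟨0, by simp [ha, List.take_succ_cons, ht]⟩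
      · exact ⟨n + 1, by simpa using hn⟩
    · rintro ⟨n, hn⟩
      cases n with
      | zero =>
        left
        simp only [List.drop_zero, List.take_succ_cons] at hn
        injection hn with h1 h2
        exact ⟨h1, h2⟩
      | succ m => exact Or.inr ⟨m, by simpa using hn⟩

lemma A_char (x : List Int) : ∀ (n : Nat), n ≤ 2 →
    labelGo x (n : Int) =
      if hasZZZ (List.replicate n 0 ++ x.filter (fun a => a == 0 || a == 1)) then 0 else 1 := by
  induction x with
  | nil =>
    intro n hn
    interval_cases n <;> simp [labelGo, hasZZZ]
  | cons a rest ih =>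
    intro n hn
    by_cases ha0 : a = 0
    · subst ha0
      interval_cases n
      · have := ih 1 (by omega)
        simpa [labelGo, List.replicate] using this
      · have := ih 2 (by omega)
        simp only [labelGo]
        norm_num
        simpa [List.replicate] using this
      · simp [labelGo, hasZZZ, List.replicate]
    · by_cases ha1 : a = 1
      · subst ha1
        have := ih 0 (by omega)
        have hpre : hasZZZ (List.replicate n 0 ++ (1 : Int) ::
            rest.filter (fun a => a == 0 || a == 1)) =
            hasZZZ (rest.filter (fun a => a == 0 || a == 1)) := by
          interval_cases n <;> simp [hasZZZ, List.replicate, List.take]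
        simpa [labelGo, hpre] using this
      · have := ih n hn
        simpa [labelGo, ha0, ha1] using this

lemma B_char (f : List Int) :
    ((PySem.List.pyRange 0 ((f.length : Int) - 2) 1).any
      (fun i => PySem.List.slice f (some i) (some (i + 3)) == [0, 0, 0])) = hasZZZ f := by
  rcases h : hasZZZ f with _ | _
  · -- hasZZZ false: no window, so any is false
    rw [List.any_eq_false]
    intro i hi
    rw [PySem.List.mem_pyRange_one] at hi
    obtain ⟨h0, h2⟩ := hi
    intro hc
    rw [beq_iff_eq] at hc
    have hiN : i = ((i.toNat : Nat) : Int) := by omega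
    rw [hiN] at hc
    have h3 : ((3:Int)) = ((3:Nat):Int) := rfl
    rw [h3, PySem.List.slice_natCast_add] at hc
    have : hasZZZ f = true := (hasZZZ_iff f).2 ⟨i.toNat, hc⟩
    rw [h] at this; exact absurd this (by simp)
  · rw [List.any_eq_true]
    obtain ⟨n, hn⟩ := (hasZZZ_iff f).1 h
    have hlen : n + 3 ≤ f.length := by
      have hl := congrArg List.length hn
      simp only [List.length_take, List.length_drop, List.length_cons,
        List.length_nil] at hl
      omega
    refine ⟨(n : Int), ?_, ?_⟩
    · rw [PySem.List.mem_pyRange_one]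
      constructor
      · exact Int.natCast_nonneg n
      · omega
    · have h3 : ((3:Int)) = ((3:Nat):Int) := rfl
      rw [h3, PySem.List.slice_natCast_add, hn]
      rfl

-- ===== VERDICT (by name: the statement is the Claim_ definition above) =====
theorem label_spec : Claim_equal_label := by
  intro x _
  unfold Spec_label label label_alt
  have hA := A_char x 0 (by omega)
  simp only [List.replicate, List.nil_append, Int.natCast_zero] at hA
  rw [hA]
  show _ = (if ((PySem.List.pyRange 0 (((x.filter (fun a => a == 0 || a == 1)).length : Int) - 2) 1).any
       (fun i => PySem.List.slice (x.filter (fun a => a == 0 || a == 1)) (some i) (some (i + 3)) == [0, 0, 0])) = true then 0 else 1)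
  rw [B_char]
  rfl
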